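-- pv_equiv track=rewrite | github.com/szlaci83/book_summarizer | text_analyser.py | most_freq_after
-- ===== SOURCE A (Python) =====
-- def most_freq_after(word_list, word_to_check, step = 1):
--     '''Returns the most frequent word after a given word (word_to_check). Step means how many words after.'''
--     result = "The textfile doesn't contain this word: " +word_to_check
--     dict = {}
--     for i in range (len(word_list)):
--         if word_list[i] == word_to_check:
--             word_after = word_list[i+step]
--             if word_after in dict:
--                 dict[word_after] = dict[word_after] +1
--             else:
--                 dict[word_after] = 1
--
--     if dict:
--         result =  max(dict, key = dict.get)
--     return result
-- ===== SOURCE B (Python) =====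
-- def most_freq_after(word_list, word_to_check, step=1):
--     '''Mode of the followers via sort + run-length scan (no frequency dict), ties to earliest occurrence.'''
--     following = []
--     for i in range(len(word_list)):
--         if word_list[i] == word_to_check:
--             following.append(word_list[i + step])
--     if not following:
--         return "The textfile doesn't contain this word: " + word_to_check
--     ordered = sorted(following)
--     winners, best = [], 0
--     j, n = 0, len(ordered)
--     while j < n:
--         k = j
--         while k < n and ordered[k] == ordered[j]:
--             k += 1
--         if k - j > best:
--             winners, best = [ordered[j]], k - j
--         elif k - j == best:
--             winners.append(ordered[j])
--         j = k
--     return min(winners, key=following.index)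
-- ===== Notes on version B (the rewrite author's own statement) =====
-- stated objective: alternative
-- what changed: Replaces A's hash-tally (frequency dict maintained while scanning, then dict-keyed max) by a sort-based mode: collect the followers, sort them, find the maximal run length with a run-length scan collecting all words of that count, and resolve the tie with min(winners, key=following.index).
import Mathlib
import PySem

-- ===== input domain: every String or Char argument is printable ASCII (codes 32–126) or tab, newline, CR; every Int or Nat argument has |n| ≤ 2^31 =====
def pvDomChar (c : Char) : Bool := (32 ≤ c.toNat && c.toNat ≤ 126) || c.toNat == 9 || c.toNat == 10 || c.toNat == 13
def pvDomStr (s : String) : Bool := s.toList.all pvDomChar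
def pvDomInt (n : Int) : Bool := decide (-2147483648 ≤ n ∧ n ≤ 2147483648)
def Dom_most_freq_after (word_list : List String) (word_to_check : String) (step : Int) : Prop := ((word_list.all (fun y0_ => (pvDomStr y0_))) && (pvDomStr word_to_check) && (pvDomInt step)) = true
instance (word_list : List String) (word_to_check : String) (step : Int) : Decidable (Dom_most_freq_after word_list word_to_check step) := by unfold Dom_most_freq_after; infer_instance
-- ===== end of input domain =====

-- B replaces A's maintained frequency dict + dict-keyed max by a sort-based mode: sort the
-- followers, run-length-scan the sorted list for the words of maximal count, and break the tie
-- by earliest first occurrence; same result by a different algorithm (not faster).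

-- ===== PORT A =====
def most_freq_after (word_list : List String) (word_to_check : String) (step : Int) : String :=
  let result := "The textfile doesn't contain this word: " ++ word_to_check
  let d : PySem.Dict String Int :=
    (PySem.List.pyRange 0 (word_list.length : Int) 1).foldl
      (fun d i =>
        if PySem.List.pyGetD word_list i "" == word_to_check then
          let word_after := PySem.List.pyGetD word_list (i + step) ""
          if d.contains word_after then d.insert word_after (d.getD word_after 0 + 1)
          else d.insert word_after 1
        else d)
      PySem.Dict.empty
  -- max(dict, key=dict.get): first key with maximal value; dict.get on a key of d is d.getD _ 0
  if d.items = [] then result else PySem.List.maxD d.keys (fun k => d.getD k 0) result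

-- ===== PORT B =====
-- inner 'while k < n and ordered[k] == ordered[j]': consume the run of words equal to w,
-- returning the run length counted beyond the first element and the rest of the list
def pvTakeRun (w : String) : List String → Nat × List String
  | [] => (0, [])
  | x :: xs => if x == w then ((pvTakeRun w xs).1 + 1, (pvTakeRun w xs).2) else (0, x :: xs)

theorem pvTakeRun_len (w : String) : ∀ l : List String, (pvTakeRun w l).2.length ≤ l.length := by
  intro l
  induction l with
  | nil => simp [pvTakeRun]
  | cons x xs ih =>
    by_cases h : x == w
    · simp only [pvTakeRun, if_pos h]; exact Nat.le_succ_of_le ih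
    · simp [pvTakeRun, h]

-- outer 'while j < n' loop: one step per run, maintaining (winners, best)
def pvRunLoop : List String → List String → Int → List String × Int
  | [], winners, best => (winners, best)
  | x :: xs, winners, best =>
    let r := pvTakeRun x xs
    let cnt : Int := (r.1 : Int) + 1
    if best < cnt then pvRunLoop r.2 [x] cnt
    else if cnt = best then pvRunLoop r.2 (winners ++ [x]) best
    else pvRunLoop r.2 winners best
termination_by l => l.length
decreasing_by
  all_goals exact Nat.lt_succ_of_le (pvTakeRun_len x xs)

def most_freq_after_alt (word_list : List String) (word_to_check : String) (step : Int) : String :=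
  let following : List String :=
    (PySem.List.pyRange 0 (word_list.length : Int) 1).foldl
      (fun acc i =>
        if PySem.List.pyGetD word_list i "" == word_to_check then
          acc ++ [PySem.List.pyGetD word_list (i + step) ""]
        else acc)
      []
  if following = [] then "The textfile doesn't contain this word: " ++ word_to_check
  else
    let ordered := PySem.List.sorted following (fun x => x)
    let wb := pvRunLoop ordered [] 0
    -- min(winners, key=following.index): winners is nonempty and ⊆ following here, so the
    -- defaults of minD / index?.getD are unreachable
    PySem.List.minD wb.1 (fun x => (((PySem.List.index? following x).getD 0 : Nat) : Int)) ""

-- ===== PRECONDITION & SPEC =====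
-- Pre_ excludes exactly the inputs where Python A raises IndexError: some occurrence of
-- word_to_check at index i with i+step outside [-len, len).
def Pre_most_freq_after (word_list : List String) (word_to_check : String) (step : Int) : Prop :=
  ∀ i : Fin word_list.length, word_list[i] = word_to_check →
    PySem.Raise.InRange word_list.length ((i : Int) + step)
instance (word_list : List String) (word_to_check : String) (step : Int) : Decidable (Pre_most_freq_after word_list word_to_check step) := by unfold Pre_most_freq_after; infer_instance

def pvWitness_most_freq_after : List String × String × Int := (["a", "b", "a", "c"], "a", 1)

def Spec_most_freq_after (word_list : List String) (word_to_check : String) (step : Int) (out : String) : Prop := out = most_freq_after_alt word_list word_to_check step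
instance (word_list : List String) (word_to_check : String) (step : Int) (out : String) : Decidable (Spec_most_freq_after word_list word_to_check step out) := by unfold Spec_most_freq_after; infer_instance

-- ===== CLAIM (what is proved, stated in full; the proofs are below) =====
def Claim_equal_most_freq_after : Prop := ∀ (word_list : List String) (word_to_check : String) (step : Int), Dom_most_freq_after word_list word_to_check step → Pre_most_freq_after word_list word_to_check step → Spec_most_freq_after word_list word_to_check step (most_freq_after word_list word_to_check step)

-- ===== LEMMAS AND PROOFS =====

-- a fold with an 'if P then use (f i) else skip' body is the fold over the filtered, mapped list
theorem pv_foldl_filter_map {ι α β : Type} (P : ι → Bool) (f : ι → α) (g : β → α → β) :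
    ∀ (l : List ι) (init : β),
      l.foldl (fun acc i => if P i then g acc (f i) else acc) init
        = ((l.filter P).map f).foldl g init := by
  intro l
  induction l with
  | nil => intro init; rfl
  | cons x xs ih => intro init; by_cases h : P x <;> simp [h, ih]

theorem pv_max?_append_singleton {α : Type} (key : α → Int) (xs : List α) (x : α) :
    PySem.List.max? (xs ++ [x]) key =
      match PySem.List.max? xs key with
      | none => some x
      | some m => if key m < key x then some x else some m := by
  cases h : PySem.List.max? xs key <;>
    simpa [PySem.List.max?, List.foldl_append] using congrArg
      (fun o => [x].foldl (fun acc y =>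
        match acc with
        | none => some y
        | some m => if key m < key y then some y else some m) o) h

-- max with a value-only key is unchanged by first-occurrence deduplication
theorem pv_max?_ofList {α : Type} [BEq α] [LawfulBEq α] (key : α → Int) (L : List α) :
    PySem.List.max? (PySem.Set.ofList L) key = PySem.List.max? L key := by
  induction L using List.reverseRecOn with
  | nil => rfl
  | append_singleton xs x ih =>
    rw [PySem.Set.ofList_append_singleton]
    by_cases hx : x ∈ xs
    · rw [PySem.Set.add_of_mem (by simpa [PySem.Set.mem_ofList] using hx),
        ih, pv_max?_append_singleton]
      obtain ⟨m, hm⟩ : ∃ m, PySem.List.max? xs key = some m := by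
        cases h : PySem.List.max? xs key with
        | none =>
          rw [(PySem.List.max?_eq_none_iff xs key).mp h] at hx
          exact absurd hx (List.not_mem_nil)
        | some m => exact ⟨m, rfl⟩
      rw [hm]
      simp [not_lt.mpr (PySem.List.max?_isMax hm x hx)]
    · rw [PySem.Set.add_of_not_mem (by simpa [PySem.Set.mem_ofList] using hx),
        pv_max?_append_singleton, pv_max?_append_singleton, ih]

theorem pv_ofList_eq_nil_iff {α : Type} [BEq α] [LawfulBEq α] (L : List α) :
    PySem.Set.ofList L = [] ↔ L = [] := by
  cases L with
  | nil => simp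
  | cons x xs => simp [PySem.Set.ofList_cons]

-- max? splits its list at the FIRST element attaining the maximum
theorem pv_max?_decomp {α : Type} (key : α → Int) (L : List α) (m : α)
    (h : PySem.List.max? L key = some m) :
    ∃ pre suf, L = pre ++ m :: suf ∧ (∀ v ∈ pre, key v < key m) ∧ (∀ v ∈ suf, key v ≤ key m) := by
  induction L using List.reverseRecOn with
  | nil => simp [PySem.List.max?] at h
  | append_singleton xs x ih =>
    rw [pv_max?_append_singleton] at h
    cases hxs : PySem.List.max? xs key with
    | none =>
      rw [hxs] at h
      simp only [Option.some.injEq] at h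
      subst h
      refine ⟨xs, [], rfl, fun v hv => ?_, fun v hv => by cases hv⟩
      rw [(PySem.List.max?_eq_none_iff xs key).mp hxs] at hv; cases hv
    | some m0 =>
      rw [hxs] at h
      simp only at h
      by_cases hlt : key m0 < key x
      · rw [if_pos hlt] at h
        simp only [Option.some.injEq] at h
        subst h
        exact ⟨xs, [], rfl,
          fun v hv => lt_of_le_of_lt (PySem.List.max?_isMax hxs v hv) hlt,
          fun v hv => by cases hv⟩
      · rw [if_neg hlt] at h
        simp only [Option.some.injEq] at h
        subst h
        obtain ⟨pre, suf, hL, hpre, hsuf⟩ := ih hxs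
        refine ⟨pre, suf ++ [x], by simp [hL], hpre, ?_⟩
        intro v hv
        rcases List.mem_append.mp hv with hv | hv
        · exact hsuf v hv
        · simp only [List.mem_singleton] at hv; subst hv; exact not_lt.mp hlt

-- first index of the marked occurrence in an append
theorem pv_idxOf_append_le (m : String) : ∀ (pre suf : List String),
    (pre ++ m :: suf).idxOf m ≤ pre.length := by
  intro pre
  induction pre with
  | nil => simp
  | cons p ps ih =>
    intro suf
    by_cases hp : p = m
    · subst hp; simp
    · simpa [List.idxOf_cons, beq_eq_false_iff_ne.mpr hp] using Nat.succ_le_succ (ih suf)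

theorem pv_idxOf_append_ge (v : String) : ∀ (pre rest : List String), v ∉ pre →
    pre.length ≤ (pre ++ rest).idxOf v := by
  intro pre
  induction pre with
  | nil => simp
  | cons p ps ih =>
    intro rest h
    have hp : p ≠ v := fun e => h (by simp [e])
    simpa [List.idxOf_cons, beq_eq_false_iff_ne.mpr hp] using
      Nat.succ_le_succ (ih rest (fun e => h (by simp [e])))

theorem pv_idxOf?_of_mem (v : String) : ∀ (F : List String), v ∈ F → F.idxOf? v = some (F.idxOf v) := by
  intro F
  induction F with
  | nil => simp
  | cons x xs ih =>
    intro h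
    by_cases hx : x = v
    · subst hx; simp [List.idxOf?_cons]
    · have hb := beq_eq_false_iff_ne.mpr hx
      have hv : v ∈ xs := by rcases List.mem_cons.mp h with e | e; exact absurd e.symm hx; exact e
      simp [List.idxOf?_cons, List.idxOf_cons, hb, ih hv]

-- the winner of the task: maximal count, among those the least first-occurrence index
def pvIsWin (F : List String) (m : String) : Prop :=
  m ∈ F ∧ ∀ v ∈ F, F.count v ≤ F.count m ∧ (F.count v = F.count m → F.idxOf m ≤ F.idxOf v)

theorem pv_isWin_unique (F : List String) (m m' : String)
    (h : pvIsWin F m) (h' : pvIsWin F m') : m = m' := by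
  obtain ⟨hm, hall⟩ := h
  obtain ⟨hm', hall'⟩ := h'
  obtain ⟨hc1, hi1⟩ := hall m' hm'
  obtain ⟨hc2, hi2⟩ := hall' m hm
  have hc : F.count m' = F.count m := le_antisymm hc1 hc2
  have hi : F.idxOf m = F.idxOf m' := le_antisymm (hi1 hc) (hi2 hc.symm)
  have l1 : F.idxOf m < F.length := List.idxOf_lt_length_of_mem hm
  have l2 : F.idxOf m' < F.length := List.idxOf_lt_length_of_mem hm'
  calc m = F[F.idxOf m] := (List.getElem_idxOf l1).symm
    _ = F[F.idxOf m'] := by congr 1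
    _ = m' := List.getElem_idxOf l2

theorem pv_A_isWin (F : List String) (m : String)
    (h : PySem.List.max? F (fun v => (F.count v : Int)) = some m) : pvIsWin F m := by
  refine ⟨PySem.List.max?_mem h, fun v hv => ⟨?_, ?_⟩⟩
  · exact_mod_cast PySem.List.max?_isMax h v hv
  · intro hcnt
    obtain ⟨pre, suf, hL, hpre, hsuf⟩ := pv_max?_decomp _ F m h
    have hvpre : v ∉ pre := fun hvp => absurd (hpre v hvp) (by rw [hcnt]; exact lt_irrefl _)
    calc F.idxOf m ≤ pre.length := by rw [hL]; exact pv_idxOf_append_le m pre suf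
      _ ≤ F.idxOf v := by rw [hL]; exact pv_idxOf_append_ge v pre (m :: suf) hvpre

theorem pv_takeRun_spec (x : String) : ∀ (xs : List String), (x :: xs).Pairwise (· ≤ ·) →
    (pvTakeRun x xs).1 = xs.count x ∧
    (∀ v, v ≠ x → (pvTakeRun x xs).2.count v = xs.count v) ∧
    (∀ y ∈ (pvTakeRun x xs).2, x < y) ∧
    (pvTakeRun x xs).2.Pairwise (· ≤ ·) := by
  intro xs
  induction xs with
  | nil => simp [pvTakeRun]
  | cons y ys ih =>
    intro h
    have hxy : x ≤ y := (List.pairwise_cons.mp h).1 y (by simp)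
    have hyys : (y :: ys).Pairwise (· ≤ ·) := (List.pairwise_cons.mp h).2
    by_cases hb : y = x
    · subst hb
      have hih := ih (by
        refine List.pairwise_cons.mpr ⟨fun z hz => ?_, (List.pairwise_cons.mp hyys).2⟩
        exact le_trans hxy ((List.pairwise_cons.mp hyys).1 z hz))
      have hstep : pvTakeRun y (y :: ys) = ((pvTakeRun y ys).1 + 1, (pvTakeRun y ys).2) := by
        simp [pvTakeRun]
      refine ⟨?_, fun v hvx => ?_, ?_, ?_⟩
      · rw [hstep]; simp [hih.1, List.count_cons_self]
      · rw [hstep]; simp [hih.2.1 v hvx, Ne.symm hvx]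
      · rw [hstep]; exact hih.2.2.1
      · rw [hstep]; exact hih.2.2.2
    · have hlt : x < y := lt_of_le_of_ne hxy (fun e => hb e.symm)
      have hall : ∀ z ∈ y :: ys, x < z := by
        intro z hz
        rcases List.mem_cons.mp hz with e | e
        · exact e ▸ hlt
        · exact lt_of_lt_of_le hlt ((List.pairwise_cons.mp hyys).1 z e)
      have hbne : (y == x) = false := beq_eq_false_iff_ne.mpr hb
      refine ⟨?_, fun v hvx => ?_, ?_, ?_⟩
      · simp only [pvTakeRun, hbne]
        exact (List.count_eq_zero.mpr (fun hmem => lt_irrefl x (hall x hmem))).symm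
      · simp [pvTakeRun, hbne]
      · simpa [pvTakeRun, hbne] using hall
      · simpa [pvTakeRun, hbne] using hyys

theorem pv_runLoop_aux : ∀ (n : Nat) (rest winners : List String) (best : Int),
    rest.length ≤ n →
    rest.Pairwise (· ≤ ·) →
    (∀ w ∈ winners, w ∉ rest) →
    0 ≤ best →
    (0 < best → winners ≠ []) →
    best ≤ (pvRunLoop rest winners best).2 ∧
    (∀ v ∈ rest, (rest.count v : Int) ≤ (pvRunLoop rest winners best).2) ∧
    (∀ w, w ∈ (pvRunLoop rest winners best).1 ↔
      ((w ∈ winners ∧ best = (pvRunLoop rest winners best).2) ∨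
       (w ∈ rest ∧ (rest.count w : Int) = (pvRunLoop rest winners best).2))) ∧
    ((rest ≠ [] ∨ winners ≠ []) → (pvRunLoop rest winners best).1 ≠ []) := by
  intro n
  induction n with
  | zero =>
    intro rest winners best hlen hpair hwin hb0 hbw
    have : rest = [] := List.eq_nil_of_length_eq_zero (Nat.le_zero.mp hlen)
    subst this
    rw [pvRunLoop]
    refine ⟨le_refl _, by simp, fun w => by simp, fun h => ?_⟩
    rcases h with h | h
    · exact absurd rfl h
    · exact h
  | succ n IH =>
    intro rest winners best hlen hpair hwin hb0 hbw
    cases rest with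
    | nil =>
      rw [pvRunLoop]
      refine ⟨le_refl _, by simp, fun w => by simp, fun h => ?_⟩
      rcases h with h | h
      · exact absurd rfl h
      · exact h
    | cons x xs =>
      obtain ⟨hc1, hc2, hgt, hpair'⟩ := pv_takeRun_spec x xs hpair
      set r := pvTakeRun x xs with hr
      set cnt : Int := (r.1 : Int) + 1 with hcntdef
      have heq : pvRunLoop (x :: xs) winners best =
          (if best < cnt then pvRunLoop r.2 [x] cnt
           else if cnt = best then pvRunLoop r.2 (winners ++ [x]) best
           else pvRunLoop r.2 winners best) := by
        rw [pvRunLoop]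
      have hxnot : x ∉ r.2 := fun hm => lt_irrefl x (hgt x hm)
      have hlen' : r.2.length ≤ n := le_trans (pvTakeRun_len x xs) (Nat.le_of_succ_le_succ hlen)
      have hmem2 : ∀ v, v ≠ x → (v ∈ r.2 ↔ v ∈ xs) := by
        intro v hv
        rw [← List.count_pos_iff, ← List.count_pos_iff, hc2 v hv]
      have hcntx : (((x :: xs).count x : Nat) : Int) = cnt := by
        simp [List.count_cons_self, hc1, hcntdef]
      have hcnt_ne : ∀ v, v ≠ x → (x :: xs).count v = r.2.count v := by
        intro v hv
        simp [hc2 v hv, Ne.symm hv]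
      have hcpos : (0 : Int) < cnt := by omega
      have hwnotr : ∀ w ∈ winners, w ∉ r.2 := by
        intro w hw hwr
        have hne : w ≠ x := fun e => hxnot (e ▸ hwr)
        exact hwin w hw (List.mem_cons_of_mem _ ((hmem2 w hne).mp hwr))
      by_cases h1 : best < cnt
      · have ih := IH r.2 [x] cnt hlen' hpair'
          (by intro w hw; simp at hw; subst hw; exact hxnot) (le_of_lt hcpos) (fun _ => by simp)
        obtain ⟨i1, i2, i3, i4⟩ := ih
        rw [heq, if_pos h1]
        have hb2 : (0:Int) ≤ (pvRunLoop r.2 [x] cnt).2 := le_trans (le_of_lt hcpos) i1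
        refine ⟨le_trans (le_of_lt h1) i1, ?_, ?_, ?_⟩
        · intro v hv
          by_cases hvx : v = x
          · subst hvx; rw [hcntx]; exact i1
          · rw [hcnt_ne v hvx]
            by_cases hvr : v ∈ r.2
            · exact i2 v hvr
            · rw [List.count_eq_zero.mpr hvr]; exact_mod_cast hb2
        · intro w
          rw [i3 w]
          constructor
          · rintro (⟨hw, hcb⟩ | ⟨hw, hcb⟩)
            · simp only [List.mem_singleton] at hw; subst hw
              exact Or.inr ⟨List.mem_cons_self, by rw [hcntx]; exact hcb⟩
            · have hne : w ≠ x := (hgt w hw).ne'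
              exact Or.inr ⟨List.mem_cons_of_mem _ ((hmem2 w hne).mp hw),
                by rw [hcnt_ne w hne]; exact hcb⟩
          · rintro (⟨hw, hcb⟩ | ⟨hw, hcb⟩)
            · exact absurd hcb (ne_of_lt (lt_of_lt_of_le h1 i1))
            · by_cases hne : w = x
              · subst hne
                exact Or.inl ⟨List.mem_singleton_self _, hcntx.symm.trans hcb⟩
              · have hwxs : w ∈ xs := by
                  rcases List.mem_cons.mp hw with e | e
                  · exact absurd e hne
                  · exact e
                have hcr : ((r.2.count w : Nat) : Int) = (pvRunLoop r.2 [x] cnt).2 := by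
                  rw [← hcnt_ne w hne]; exact hcb
                have hpos : 0 < r.2.count w := by
                  have : (1:Int) ≤ ((r.2.count w : Nat) : Int) := by
                    rw [hcr]; omega
                  exact_mod_cast this
                exact Or.inr ⟨List.count_pos_iff.mp hpos, hcr⟩
        · intro _
          exact i4 (Or.inr (by simp))
      · by_cases h2 : cnt = best
        · have ih := IH r.2 (winners ++ [x]) best hlen' hpair'
            (by
              intro w hw
              rcases List.mem_append.mp hw with hw | hw
              · exact hwnotr w hw
              · simp only [List.mem_singleton] at hw; subst hw; exact hxnot)
            hb0 (fun _ => by simp)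
          obtain ⟨i1, i2, i3, i4⟩ := ih
          rw [heq, if_neg h1, if_pos h2]
          have hb2 : (0:Int) ≤ (pvRunLoop r.2 (winners ++ [x]) best).2 := le_trans hb0 i1
          refine ⟨i1, ?_, ?_, ?_⟩
          · intro v hv
            by_cases hvx : v = x
            · subst hvx; rw [hcntx, h2]; exact i1
            · rw [hcnt_ne v hvx]
              by_cases hvr : v ∈ r.2
              · exact i2 v hvr
              · rw [List.count_eq_zero.mpr hvr]; exact_mod_cast hb2
          · intro w
            rw [i3 w]
            constructor
            · rintro (⟨hw, hcb⟩ | ⟨hw, hcb⟩)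
              · rcases List.mem_append.mp hw with hw | hw
                · exact Or.inl ⟨hw, hcb⟩
                · simp only [List.mem_singleton] at hw; subst hw
                  exact Or.inr ⟨List.mem_cons_self, by rw [hcntx, h2]; exact hcb⟩
              · have hne : w ≠ x := (hgt w hw).ne'
                exact Or.inr ⟨List.mem_cons_of_mem _ ((hmem2 w hne).mp hw),
                  by rw [hcnt_ne w hne]; exact hcb⟩
            · rintro (⟨hw, hcb⟩ | ⟨hw, hcb⟩)
              · exact Or.inl ⟨List.mem_append_left _ hw, hcb⟩
              · by_cases hne : w = x
                · subst hne
                  refine Or.inl ⟨List.mem_append_right _ (List.mem_singleton_self _), ?_⟩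
                  exact (h2.symm.trans hcntx.symm).trans hcb
                · have hcr : ((r.2.count w : Nat) : Int) = (pvRunLoop r.2 (winners ++ [x]) best).2 := by
                    rw [← hcnt_ne w hne]; exact hcb
                  have hpos : 0 < r.2.count w := by
                    have h1' : best ≤ (pvRunLoop r.2 (winners ++ [x]) best).2 := i1
                    have : (1:Int) ≤ ((r.2.count w : Nat) : Int) := by rw [hcr]; omega
                    exact_mod_cast this
                  exact Or.inr ⟨List.count_pos_iff.mp hpos, hcr⟩
          · intro _
            exact i4 (Or.inr (by simp))
        · have h3 : cnt < best := lt_of_le_of_ne (not_lt.mp h1) h2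
          have hwne : winners ≠ [] := hbw (lt_trans hcpos h3)
          have ih := IH r.2 winners best hlen' hpair' hwnotr hb0 (fun _ => hwne)
          obtain ⟨i1, i2, i3, i4⟩ := ih
          rw [heq, if_neg h1, if_neg h2]
          have hb2 : (0:Int) ≤ (pvRunLoop r.2 winners best).2 := le_trans hb0 i1
          refine ⟨i1, ?_, ?_, ?_⟩
          · intro v hv
            by_cases hvx : v = x
            · subst hvx; rw [hcntx]; exact le_trans (le_of_lt h3) i1
            · rw [hcnt_ne v hvx]
              by_cases hvr : v ∈ r.2
              · exact i2 v hvr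
              · rw [List.count_eq_zero.mpr hvr]; exact_mod_cast hb2
          · intro w
            rw [i3 w]
            constructor
            · rintro (⟨hw, hcb⟩ | ⟨hw, hcb⟩)
              · exact Or.inl ⟨hw, hcb⟩
              · have hne : w ≠ x := (hgt w hw).ne'
                exact Or.inr ⟨List.mem_cons_of_mem _ ((hmem2 w hne).mp hw),
                  by rw [hcnt_ne w hne]; exact hcb⟩
            · rintro (⟨hw, hcb⟩ | ⟨hw, hcb⟩)
              · exact Or.inl ⟨hw, hcb⟩
              · by_cases hne : w = x
                · subst hne
                  rw [hcntx] at hcb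
                  exact absurd hcb (ne_of_lt (lt_of_lt_of_le h3 i1))
                · have hcr : ((r.2.count w : Nat) : Int) = (pvRunLoop r.2 winners best).2 := by
                    rw [← hcnt_ne w hne]; exact hcb
                  have hpos : 0 < r.2.count w := by
                    have : (1:Int) ≤ ((r.2.count w : Nat) : Int) := by rw [hcr]; omega
                    exact_mod_cast this
                  exact Or.inr ⟨List.count_pos_iff.mp hpos, hcr⟩
          · intro _
            exact i4 (Or.inr hwne)

-- ===== VERDICT (by name: the statement is the Claim_ definition above) =====
theorem most_freq_after_spec : Claim_equal_most_freq_after := by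
  intro word_list word_to_check step _ _
  unfold Spec_most_freq_after most_freq_after most_freq_after_alt
  simp only []
  simp only [pv_foldl_filter_map
        (fun i => PySem.List.pyGetD word_list i "" == word_to_check)
        (fun i => PySem.List.pyGetD word_list (i + step) "")
        (fun (d : PySem.Dict String Int) word_after =>
          if d.contains word_after then d.insert word_after (d.getD word_after 0 + 1)
          else d.insert word_after 1),
    PySem.List.foldl_append_if, List.nil_append]
  set F : List String :=
    ((PySem.List.pyRange 0 (word_list.length : Int) 1).filter
        (fun i => PySem.List.pyGetD word_list i "" == word_to_check)).map
      (fun i => PySem.List.pyGetD word_list (i + step) "") with hF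
  have hbody : (fun (d : PySem.Dict String Int) word_after =>
      if d.contains word_after then d.insert word_after (d.getD word_after 0 + 1)
      else d.insert word_after 1)
      = fun d x => d.insert x (d.getD x 0 + 1) := by
    funext d x
    cases h : d.contains x with
    | true => simp
    | false => simp [PySem.Dict.getD_of_not_contains d (0:Int) h]
  simp only [hbody, PySem.Dict.foldl_insert_getD_add_one_eq_counter]
  rw [PySem.Dict.items_counter, PySem.Dict.keys_counter]
  have hkey : (fun k => (PySem.Dict.counter F).getD k 0) = fun v => ((F.count v : Nat) : Int) := by
    funext k; exact PySem.Dict.getD_counter F k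
  by_cases hnil : F = []
  · simp [hnil]
  · have hmapne : (PySem.Set.ofList F).map (fun k => (k, (F.count k : Int))) ≠ [] := by
      simp [pv_ofList_eq_nil_iff, hnil]
    rw [if_neg hmapne, if_neg hnil, hkey]
    -- A side: max over the first-occurrence-deduplicated followers by count
    unfold PySem.List.maxD
    rw [pv_max?_ofList]
    obtain ⟨mA, hmA⟩ : ∃ m, PySem.List.max? F (fun v => ((F.count v : Nat) : Int)) = some m := by
      cases h : PySem.List.max? F (fun v => ((F.count v : Nat) : Int)) with
      | none => exact absurd ((PySem.List.max?_eq_none_iff F _).mp h) hnil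
      | some m => exact ⟨m, rfl⟩
    rw [hmA]
    have hAwin : pvIsWin F mA := pv_A_isWin F mA hmA
    -- B side: run scan over the sorted followers, tie broken by first index
    set S : List String := PySem.List.sorted F (fun x => x) with hS
    have hperm : S.Perm F := PySem.List.sorted_perm F (fun x => x) false
    have hpair : S.Pairwise (· ≤ ·) := PySem.List.sorted_pairwise F (fun x => x)
    have hSne : S ≠ [] := by
      intro e
      exact hnil ((PySem.List.sorted_eq_nil_iff F (fun x => x) false).mp e)
    obtain ⟨i1, i2, i3, i4⟩ := pv_runLoop_aux S.length S [] 0 le_rfl hpair (by simp) le_rfl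
      (fun h => absurd h (lt_irrefl 0))
    have hW : ∀ u, u ∈ (pvRunLoop S [] 0).1 ↔
        (u ∈ S ∧ ((S.count u : Nat) : Int) = (pvRunLoop S [] 0).2) := by
      intro u
      rw [i3 u]
      constructor
      · rintro (⟨hu, _⟩ | hu)
        · cases hu
        · exact hu
      · exact fun hu => Or.inr hu
    have hWne : (pvRunLoop S [] 0).1 ≠ [] := i4 (Or.inl hSne)
    set keyidx : String → Int := fun u => (((PySem.List.index? F u).getD 0 : Nat) : Int) with hkeyidx
    obtain ⟨mB, hmB⟩ : ∃ m, PySem.List.min? (pvRunLoop S [] 0).1 keyidx = some m := by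
      cases h : PySem.List.min? (pvRunLoop S [] 0).1 keyidx with
      | none => exact absurd ((PySem.List.min?_eq_none_iff _ _).mp h) hWne
      | some m => exact ⟨m, rfl⟩
    have hcnteq : ∀ v, S.count v = F.count v := fun v => hperm.count_eq v
    obtain ⟨hmBS, hmBc⟩ := (hW mB).mp (PySem.List.min?_mem hmB)
    have hmBF : mB ∈ F := hperm.mem_iff.mp hmBS
    have hBwin : pvIsWin F mB := by
      refine ⟨hmBF, fun v hv => ⟨?_, ?_⟩⟩
      · have h2 := i2 v (hperm.mem_iff.mpr hv)
        rw [hcnteq v] at h2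
        rw [← hmBc, hcnteq mB] at h2
        exact_mod_cast h2
      · intro hcv
        have hvW : v ∈ (pvRunLoop S [] 0).1 := by
          rw [hW v]
          refine ⟨hperm.mem_iff.mpr hv, ?_⟩
          rw [hcnteq v, hcv, ← hcnteq mB]
          exact hmBc
        have hle := PySem.List.min?_isMin hmB v hvW
        rw [hkeyidx] at hle
        simp only [PySem.List.index?_eq_idxOf?, pv_idxOf?_of_mem mB F hmBF,
          pv_idxOf?_of_mem v F hv, Option.getD_some] at hle
        exact_mod_cast hle
    -- both sides return the unique winner
    unfold PySem.List.minD
    rw [hmB]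
    simp only [Option.getD_some]
    exact pv_isWin_unique F mA mB hAwin hBwin
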